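-- pv_equiv track=rewrite | github.com/vikumsw/Algorithms_For_Problem_Solving | src/main/python/numberOfWeeks2.py | numberOfWeeks
-- ===== SOURCE A (Python) =====
-- from typing import List
--
-- def numberOfWeeks(milestones: List[int]) -> int:
--
--     milestones.sort(reverse=True)
--     weeks = 0
--     lastIndex = -1
--     while True:
--         mx = 0
--         mxIndex = -1
--
--         #Traverse the milestones array find the mx and mxIndex
--         for ind, value in enumerate(milestones):
--             if value==0: continue
--             elif mx<value and ind!=lastIndex:
--                 mx = value
--                 mxIndex = ind
--             elif value<mx:break
--
--         if mx == 0: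
--             return weeks
--         else:
--             weeks +=1
--             milestones[mxIndex] -=1
--             lastIndex = mxIndex
-- ===== SOURCE B (Python) =====
-- def numberOfWeeks(milestones):
--     # One pass: total and maximum of the positive milestones, then the closed form.
--     # (A sorts its argument in place; B does not mutate -- return values agree.)
--     total = 0
--     mx = 0
--     for v in milestones:
--         if v > 0:
--             total += v
--             if v > mx:
--                 mx = v
--     rest = total - mx
--     return total if mx <= rest + 1 else 2 * rest + 1
-- ===== Notes on version B (the rewrite author's own statement) =====
-- stated objective: faster
-- what changed: Replaces A's sort plus week-by-week greedy simulation (one full decrement loop per week, O(sum*n) total) by a single pass computing the sum and maximum of the positive milestones and the closed form min(total, 2*(total-max)+1).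
import Mathlib
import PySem

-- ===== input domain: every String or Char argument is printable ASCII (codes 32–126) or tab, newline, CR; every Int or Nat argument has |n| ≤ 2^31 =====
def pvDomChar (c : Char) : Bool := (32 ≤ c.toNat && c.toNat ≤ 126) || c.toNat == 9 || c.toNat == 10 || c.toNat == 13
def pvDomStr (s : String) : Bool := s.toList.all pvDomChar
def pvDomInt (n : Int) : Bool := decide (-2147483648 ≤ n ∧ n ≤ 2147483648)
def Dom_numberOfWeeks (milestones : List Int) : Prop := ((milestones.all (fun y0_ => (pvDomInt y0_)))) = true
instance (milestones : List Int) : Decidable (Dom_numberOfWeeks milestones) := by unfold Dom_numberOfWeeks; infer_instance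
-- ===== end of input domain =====

-- B replaces A's sort + week-by-week greedy simulation by a one-pass sum/max and the
-- closed form min(total, 2*(total-max)+1); equivalence of RETURN VALUES is proved
-- (Python A additionally sorts its argument in place; B does not mutate it).


-- ===== PORT A =====
-- the inner `for ind, value in enumerate(milestones)` loop with its state (mx, mxIndex);
-- `ind` is the enumerate counter
def aScan : List Int → Nat → Int → Int → Int → Int × Int
  | [], _, _, mx, mxi => (mx, mxi)
  | v :: rest, ind, last, mx, mxi =>
    if v = 0 then aScan rest (ind + 1) last mx mxi
    else if mx < v ∧ (ind : Int) ≠ last then aScan rest (ind + 1) last v ind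
    else if v < mx then (mx, mxi)
    else aScan rest (ind + 1) last mx mxi

-- termination measure of A's while-loop: sum of the positive entries
def sumPos (l : List Int) : Nat := (l.map Int.toNat).sum

-- termination facts cited by aLoop's decreasing_by: whenever the scan reports mx ≠ 0,
-- mxIndex is a valid index ≠ lastIndex holding the value mx > 0, so the decrement
-- shrinks the measure
lemma aScan_valid (s : List Int) (l : List Int) (ind : Nat) (last mx mxi : Int)
    (hs : s = l.drop ind)
    (hacc : mx ≠ 0 → 0 < mx ∧ ∃ k : Nat, mxi = (k : Int) ∧ k < l.length ∧ (k : Int) ≠ last ∧ l.getD k 0 = mx) :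
    (aScan s ind last mx mxi).1 ≠ 0 →
      0 < (aScan s ind last mx mxi).1 ∧
      ∃ k : Nat, (aScan s ind last mx mxi).2 = (k : Int) ∧ k < l.length ∧ (k : Int) ≠ last ∧
        l.getD k 0 = (aScan s ind last mx mxi).1 := by
  induction s generalizing ind mx mxi with
  | nil => intro h; simp only [aScan] at h ⊢; exact hacc h
  | cons v rest ih =>
    have hhead : l.getD ind 0 = v ∧ ind < l.length ∧ rest = l.drop (ind + 1) := by
      have h0 : (l.drop ind)[0]? = some v := by rw [← hs]; rfl
      rw [List.getElem?_drop, Nat.add_zero] at h0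
      refine ⟨?_, ?_, ?_⟩
      · simp [List.getD_eq_getElem?_getD, h0]
      · exact (List.getElem?_eq_some_iff.mp h0).1
      · have h2 : rest = (l.drop ind).drop 1 := by rw [← hs]; rfl
        rw [h2, List.drop_drop, Nat.add_comm]
    obtain ⟨hv, hlen, hrest⟩ := hhead
    simp only [aScan]
    split_ifs with h0 hassign hbreak
    · exact ih (ind + 1) mx mxi hrest hacc
    · refine ih (ind + 1) v (ind : Int) hrest ?_
      intro _
      have h1 := hassign.1
      have hvpos : 0 < v := by
        by_cases hmx0 : mx = 0
        · omega
        · have := (hacc hmx0).1; omega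
      exact ⟨hvpos, ind, rfl, hlen, hassign.2, hv⟩
    · intro h; exact hacc h
    · exact ih (ind + 1) mx mxi hrest hacc

lemma sumPos_cons (v : Int) (rest : List Int) : sumPos (v :: rest) = v.toNat + sumPos rest := by
  simp [sumPos]

lemma getD_le_sumPos' (l : List Int) (k : Nat) (hk : k < l.length) :
    (l.getD k 0).toNat ≤ sumPos l := by
  induction l generalizing k with
  | nil => simp at hk
  | cons v rest ih =>
    rw [sumPos_cons]
    cases k with
    | zero => simp
    | succ k' => have := ih k' (by simpa using hk); simp only [List.getD_cons_succ]; omega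

lemma sumPos_set (l : List Int) (k : Nat) (x : Int) (hk : k < l.length) :
    sumPos (l.set k x) = sumPos l - (l.getD k 0).toNat + x.toNat := by
  induction l generalizing k with
  | nil => simp at hk
  | cons v rest ih =>
    cases k with
    | zero => simp [sumPos_cons]; omega
    | succ k' =>
      have h1 := ih k' (by simpa using hk)
      have h2 := getD_le_sumPos' rest k' (by simpa using hk)
      simp only [List.set_cons_succ, sumPos_cons, List.getD_cons_succ]
      omega

-- the `while True` loop of A: state = (milestones list, weeks, lastIndex)
def aLoop (l : List Int) (weeks : Int) (last : Int) : Int :=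
  let p := aScan l 0 last 0 (-1)
  if h : p.1 = 0 then weeks
  else
    -- Python: milestones[mxIndex] -= 1  (mxIndex is a valid non-negative index here,
    -- by aScan_valid, so pyGetD/pySetD are exact)
    aLoop (PySem.List.pySetD l p.2 (PySem.List.pyGetD l p.2 0 - 1)) (weeks + 1) p.2
termination_by sumPos l
decreasing_by
  obtain ⟨hpos, k, hk, hklen, -, hkval⟩ :=
    aScan_valid l l 0 last 0 (-1) (by simp) (by intro h; exact absurd rfl h) h
  have h1 : PySem.List.pyGetD l (aScan l 0 last 0 (-1)).2 0 = l.getD k 0 := by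
    rw [hk]; exact PySem.List.pyGetD_natCast ..
  have h2 : PySem.List.pySetD l (aScan l 0 last 0 (-1)).2 (PySem.List.pyGetD l (aScan l 0 last 0 (-1)).2 0 - 1)
      = l.set k (l.getD k 0 - 1) := by
    rw [h1, hk]; exact PySem.List.pySetD_natCast ..
  simp only [h2]
  have h3 := sumPos_set l k (l.getD k 0 - 1) hklen
  have h4 := getD_le_sumPos' l k hklen
  omega

def numberOfWeeks (milestones : List Int) : Int :=
  aLoop (PySem.List.sorted milestones (fun x => x) true) 0 (-1)

-- ===== PORT B =====
def bStep (acc : Int × Int) (v : Int) : Int × Int :=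
  if 0 < v then (acc.1 + v, if acc.2 < v then v else acc.2) else acc

def numberOfWeeks_alt (milestones : List Int) : Int :=
  let p := milestones.foldl bStep (0, 0)
  let rest := p.1 - p.2
  if p.2 ≤ rest + 1 then p.1 else 2 * rest + 1

-- ===== PRECONDITION & SPEC =====
def Spec_numberOfWeeks (milestones : List Int) (out : Int) : Prop := out = numberOfWeeks_alt milestones
instance (milestones : List Int) (out : Int) : Decidable (Spec_numberOfWeeks milestones out) := by unfold Spec_numberOfWeeks; infer_instance

-- ===== CLAIM (what is proved, stated in full; the proofs are below) =====
def Claim_equal_numberOfWeeks : Prop := ∀ (milestones : List Int), Dom_numberOfWeeks milestones → Spec_numberOfWeeks milestones (numberOfWeeks milestones)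

-- ===== LEMMAS AND PROOFS =====

-- maximum of the positive entries whose index (offset by ind) differs from `last`; 0 if none
def allowMax : List Int → Nat → Int → Int
  | [], _, _ => 0
  | v :: rest, ind, last =>
    if (ind : Int) ≠ last ∧ 0 < v then max v (allowMax rest (ind + 1) last)
    else allowMax rest (ind + 1) last

-- maximum of the positive entries; 0 if none
def maxPos : List Int → Int
  | [] => 0
  | v :: rest => if 0 < v then max v (maxPos rest) else maxPos rest

def fv (l : List Int) (last : Int) : Int := if 0 ≤ last then l.getD last.toNat 0 else 0

def Tsum (l : List Int) : Int := (sumPos l : Int)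

-- closed form for the number of remaining weeks from a loop state with
-- total T, allowed maximum M and forbidden value v
def Fform (T M v : Int) : Int := if M < v then min T (2 * (T - v)) else min T (2 * (T - M) + 1)

-- loop invariant: entries grow by at most 1 left-to-right, and the forbidden slot is a
-- valid index holding a non-negative value no larger than anything before it
def LoopInv (l : List Int) (last : Int) : Prop :=
  (∀ i j : Nat, i < j → j < l.length → l.getD j 0 ≤ l.getD i 0 + 1) ∧
  (last = -1 ∨ ∃ k : Nat, last = (k : Int) ∧ k < l.length ∧ 0 ≤ l.getD k 0 ∧
    ∀ i : Nat, i < k → l.getD k 0 ≤ l.getD i 0)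

lemma allowMax_nonneg (l : List Int) (ind : Nat) (last : Int) : 0 ≤ allowMax l ind last := by
  induction l generalizing ind with
  | nil => simp [allowMax]
  | cons v rest ih =>
    simp only [allowMax]; split_ifs with h
    · have := ih (ind + 1); omega
    · exact ih (ind + 1)

lemma allowMax_ge (l : List Int) (ind : Nat) (last : Int) (k : Nat)
    (hk : k < l.length) (hne : ((ind + k : Nat) : Int) ≠ last) (hpos : 0 < l.getD k 0) :
    l.getD k 0 ≤ allowMax l ind last := by
  induction l generalizing ind k with
  | nil => simp at hk
  | cons v rest ih =>
    cases k with
    | zero =>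
      simp only [List.getD_cons_zero] at hpos ⊢
      simp only [allowMax]
      have hne' : (ind : Int) ≠ last := by simpa using hne
      rw [if_pos ⟨hne', hpos⟩]; exact le_max_left _ _
    | succ k' =>
      simp only [List.getD_cons_succ] at hpos ⊢
      have hne' : ((ind + 1 + k' : Nat) : Int) ≠ last := by
        have : ind + 1 + k' = ind + (k' + 1) := by omega
        rw [this]; exact hne
      have := ih (ind + 1) k' (by simpa using hk) hne' hpos
      simp only [allowMax]; split_ifs with h
      · have : allowMax rest (ind + 1) last ≤ max v (allowMax rest (ind + 1) last) := le_max_right _ _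
        omega
      · exact this

lemma allowMax_le (l : List Int) (ind : Nat) (last : Int) (c : Int) (hc : 0 ≤ c)
    (hb : ∀ k : Nat, k < l.length → ((ind + k : Nat) : Int) ≠ last → l.getD k 0 ≤ c) :
    allowMax l ind last ≤ c := by
  induction l generalizing ind with
  | nil => simpa [allowMax] using hc
  | cons v rest ih =>
    have htail : allowMax rest (ind + 1) last ≤ c := by
      refine ih (ind + 1) ?_
      intro k hk hne
      have hne' : ((ind + (k + 1) : Nat) : Int) ≠ last := by
        have : ind + (k + 1) = ind + 1 + k := by omega
        rw [this]; exact hne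
      have := hb (k + 1) (by simpa using hk) hne'
      simpa using this
    simp only [allowMax]; split_ifs with h
    · have hhead : v ≤ c := by
        have := hb 0 (by simp) (by simpa using h.1); simpa using this
      omega
    · exact htail

lemma allowMax_attained (l : List Int) (ind : Nat) (last : Int)
    (h : 0 < allowMax l ind last) :
    ∃ k : Nat, k < l.length ∧ ((ind + k : Nat) : Int) ≠ last ∧ l.getD k 0 = allowMax l ind last := by
  induction l generalizing ind with
  | nil => simp [allowMax] at h
  | cons v rest ih =>
    simp only [allowMax] at h ⊢
    split_ifs at h ⊢ with hc
    · by_cases hle : allowMax rest (ind + 1) last ≤ v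
      · exact ⟨0, by simp, by simpa using hc.1, by simp; omega⟩
      · have hlt : v < allowMax rest (ind + 1) last := by omega
        obtain ⟨k, hk, hne, hval⟩ := ih (ind + 1) (by omega)
        refine ⟨k + 1, by simpa using hk, ?_, ?_⟩
        · have : ind + (k + 1) = ind + 1 + k := by omega
          rw [this]; exact hne
        · simp only [List.getD_cons_succ]; omega
    · obtain ⟨k, hk, hne, hval⟩ := ih (ind + 1) h
      refine ⟨k + 1, by simpa using hk, ?_, by simpa using hval⟩
      have : ind + (k + 1) = ind + 1 + k := by omega
      rw [this]; exact hne

lemma allowMax_ge0 (l : List Int) (last : Int) (k : Nat)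
    (hk : k < l.length) (hne : (k : Int) ≠ last) (hpos : 0 < l.getD k 0) :
    l.getD k 0 ≤ allowMax l 0 last :=
  allowMax_ge l 0 last k hk (by simpa using hne) hpos

lemma pair_le_sumPos (l : List Int) (i j : Nat) (hij : i ≠ j)
    (hi : i < l.length) (hj : j < l.length) :
    (l.getD i 0).toNat + (l.getD j 0).toNat ≤ sumPos l := by
  induction l generalizing i j with
  | nil => simp at hi
  | cons v rest ih =>
    rw [sumPos_cons]
    cases i with
    | zero =>
      cases j with
      | zero => omega
      | succ j' =>
        have := getD_le_sumPos' rest j' (by simpa using hj)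
        simp only [List.getD_cons_zero, List.getD_cons_succ]; omega
    | succ i' =>
      cases j with
      | zero =>
        have := getD_le_sumPos' rest i' (by simpa using hi)
        simp only [List.getD_cons_zero, List.getD_cons_succ]; omega
      | succ j' =>
        have := ih i' j' (by omega) (by simpa using hi) (by simpa using hj)
        simp only [List.getD_cons_succ]; omega

lemma sumPos_all_nonpos (l : List Int) (h : ∀ k : Nat, k < l.length → l.getD k 0 ≤ 0) :
    sumPos l = 0 := by
  induction l with
  | nil => simp [sumPos]
  | cons v rest ih =>
    rw [sumPos_cons]
    have h0 := h 0 (by simp)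
    have := ih (fun k hk => by have := h (k + 1) (by simpa using hk); simpa using this)
    simp only [List.getD_cons_zero] at h0
    omega

lemma sumPos_single (l : List Int) (m : Nat) (hm : m < l.length)
    (h : ∀ k : Nat, k < l.length → k ≠ m → l.getD k 0 ≤ 0) :
    sumPos l = (l.getD m 0).toNat := by
  induction l generalizing m with
  | nil => simp at hm
  | cons v rest ih =>
    rw [sumPos_cons]
    cases m with
    | zero =>
      have := sumPos_all_nonpos rest (fun k hk => by
        have := h (k + 1) (by simpa using hk) (by omega); simpa using this)
      simp only [List.getD_cons_zero]; omega
    | succ m' =>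
      have h0 := h 0 (by simp) (by omega)
      have := ih m' (by simpa using hm) (fun k hk hkm => by
        have := h (k + 1) (by simpa using hk) (by omega); simpa using this)
      simp only [List.getD_cons_zero] at h0
      simp only [List.getD_cons_succ]; omega

lemma getD_set_my (l : List Int) (m k : Nat) (x : Int) :
    (l.set m x).getD k 0 = if m = k ∧ m < l.length then x else l.getD k 0 := by
  induction l generalizing m k with
  | nil => simp
  | cons v rest ih =>
    cases m with
    | zero => cases k <;> simp
    | succ m' =>
      cases k with
      | zero => simp
      | succ k' =>
        simp only [List.set_cons_succ, List.getD_cons_succ, ih m' k', List.length_cons]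
        by_cases h : m' = k' ∧ m' < rest.length
        · rw [if_pos h, if_pos ⟨by omega, by omega⟩]
        · rw [if_neg h, if_neg (by omega)]

lemma aScan_fst (s : List Int) (ind : Nat) (last mx mxi : Int)
    (hH : ∀ i j : Nat, i < j → j < s.length → s.getD j 0 ≤ s.getD i 0 + 1)
    (hmx : 0 ≤ mx) :
    (aScan s ind last mx mxi).1 = max mx (allowMax s ind last) := by
  induction s generalizing ind mx mxi with
  | nil => simp only [aScan, allowMax]; omega
  | cons v rest ih =>
    have hHtail : ∀ i j : Nat, i < j → j < rest.length → rest.getD j 0 ≤ rest.getD i 0 + 1 := by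
      intro i j hij hj
      have := hH (i + 1) (j + 1) (by omega) (by simpa using hj)
      simpa using this
    by_cases h0 : v = 0
    · have hcond : ¬ ((ind : Int) ≠ last ∧ 0 < v) := by omega
      have e1 : aScan (v :: rest) ind last mx mxi = aScan rest (ind + 1) last mx mxi := by
        simp [aScan, h0]
      have e2 : allowMax (v :: rest) ind last = allowMax rest (ind + 1) last := by
        simp only [allowMax, if_neg hcond]
      rw [e1, e2, ih (ind + 1) mx mxi hHtail hmx]
    · by_cases hassign : mx < v ∧ (ind : Int) ≠ last
      · have e1 : aScan (v :: rest) ind last mx mxi = aScan rest (ind + 1) last v (ind : Int) := by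
          simp [aScan, h0, hassign]
        have e2 : allowMax (v :: rest) ind last = max v (allowMax rest (ind + 1) last) := by
          simp only [allowMax, if_pos (show (ind : Int) ≠ last ∧ 0 < v from ⟨hassign.2, by omega⟩)]
        rw [e1, e2, ih (ind + 1) v (ind : Int) hHtail (by omega)]
        omega
      · by_cases hbreak : v < mx
        · have e1 : aScan (v :: rest) ind last mx mxi = (mx, mxi) := by
            simp [aScan, h0, hassign, hbreak]
          have htail_le : allowMax rest (ind + 1) last ≤ mx := by
            refine allowMax_le rest (ind + 1) last mx hmx ?_
            intro k hk _
            have := hH 0 (k + 1) (by omega) (by simpa using hk)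
            simp only [List.getD_cons_zero, List.getD_cons_succ] at this
            omega
          have e2 : allowMax (v :: rest) ind last ≤ mx := by
            simp only [allowMax]; split_ifs <;> omega
          have e3 := allowMax_nonneg (v :: rest) ind last
          rw [e1]
          simp only
          omega
        · have e1 : aScan (v :: rest) ind last mx mxi = aScan rest (ind + 1) last mx mxi := by
            simp [aScan, h0, hassign, hbreak]
          have hvm : mx = v ∨ (ind : Int) = last := by
            by_cases hi : (ind : Int) = last
            · right; exact hi
            · left; have := fun hlt => hassign ⟨hlt, hi⟩; omega
          rw [e1, ih (ind + 1) mx mxi hHtail hmx]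
          simp only [allowMax]
          split_ifs with hc
          · rcases hvm with h | h
            · omega
            · exact absurd h hc.1
          · rfl

lemma inv_step (l : List Int) (last : Int) (hInv : LoopInv l last) (m : Nat)
    (hm : m < l.length) (_hne : (m : Int) ≠ last)
    (hval : l.getD m 0 = allowMax l 0 last) (hpos : 0 < allowMax l 0 last) :
    LoopInv (l.set m (allowMax l 0 last - 1)) (m : Int) := by
  obtain ⟨hH, hL⟩ := hInv
  set M := allowMax l 0 last with hM
  constructor
  · intro i j hij hj
    rw [List.length_set] at hj
    rw [getD_set_my, getD_set_my]
    by_cases hjm : m = j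
    · subst hjm
      rw [if_pos ⟨rfl, hm⟩, if_neg (by omega)]
      have := hH i m hij hj
      omega
    · rw [if_neg (by tauto)]
      by_cases him : m = i
      · subst him
        rw [if_pos ⟨rfl, hm⟩]
        have hjM : l.getD j 0 ≤ M := by
          by_cases hjl : (j : Int) = last
          · rcases hL with h | ⟨k, hk1, hk2, hk3, hk4⟩
            · omega
            · have hkj : k = j := by omega
              subst hkj
              have := hk4 m (by omega)
              omega
          · by_cases hjpos : 0 < l.getD j 0
            · exact allowMax_ge0 l last j hj hjl hjpos
            · omega
        omega
      · rw [if_neg (by tauto)]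
        exact hH i j hij hj
  · right
    refine ⟨m, rfl, by simpa using hm, ?_, ?_⟩
    · rw [getD_set_my, if_pos ⟨rfl, hm⟩]; omega
    · intro i hi
      rw [getD_set_my, getD_set_my, if_pos ⟨rfl, hm⟩, if_neg (by omega)]
      have := hH i m hi hm
      omega

lemma maxPos_nonneg (l : List Int) : 0 ≤ maxPos l := by
  induction l with
  | nil => simp [maxPos]
  | cons v rest ih => simp only [maxPos]; split_ifs <;> omega

lemma allowMax_neg_one (l : List Int) (ind : Nat) : allowMax l ind (-1) = maxPos l := by
  induction l generalizing ind with
  | nil => rfl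
  | cons v rest ih =>
    simp only [allowMax, maxPos, ih (ind + 1)]
    have : ((ind : Int) ≠ -1) := by omega
    by_cases hv : 0 < v
    · rw [if_pos ⟨this, hv⟩, if_pos hv]
    · rw [if_neg (by tauto), if_neg hv]

lemma bFold (l : List Int) : ∀ t m : Int, 0 ≤ m →
    l.foldl bStep (t, m) = (t + Tsum l, max m (maxPos l)) := by
  induction l with
  | nil => intro t m hm; simp [Tsum, sumPos, maxPos]; omega
  | cons v rest ih =>
    intro t m hm
    have h2 := maxPos_nonneg rest
    rw [List.foldl_cons]
    by_cases hv : 0 < v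
    · have hb : bStep (t, m) v = (t + v, if m < v then v else m) := by simp [bStep, hv]
      rw [hb, ih (t + v) (if m < v then v else m) (by split_ifs <;> omega)]
      have hT : Tsum (v :: rest) = v + Tsum rest := by
        simp only [Tsum, sumPos_cons]; omega
      have hM : maxPos (v :: rest) = max v (maxPos rest) := by
        simp only [maxPos, if_pos hv]
      rw [hT, hM]
      refine Prod.ext (by simp only; omega) ?_
      simp only
      split_ifs <;> omega
    · have hb : bStep (t, m) v = (t, m) := by simp [bStep, hv]
      have hT : Tsum (v :: rest) = Tsum rest := by
        simp only [Tsum, sumPos_cons]; omega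
      have hM : maxPos (v :: rest) = maxPos rest := by
        simp only [maxPos, if_neg hv]
      rw [hb, ih t m hm, hT, hM]

lemma Tsum_perm (l₁ l₂ : List Int) (h : l₁.Perm l₂) : Tsum l₁ = Tsum l₂ := by
  unfold Tsum sumPos
  rw [(h.map Int.toNat).sum_eq]

lemma maxPos_perm (l₁ l₂ : List Int) (h : l₁.Perm l₂) : maxPos l₁ = maxPos l₂ := by
  induction h with
  | nil => rfl
  | cons x _ ih => simp only [maxPos, ih]
  | swap x y l => simp only [maxPos]; split_ifs <;> omega
  | trans _ _ ih1 ih2 => exact ih1.trans ih2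

lemma maxPos_le_Tsum (l : List Int) : maxPos l ≤ Tsum l := by
  induction l with
  | nil => simp [maxPos, Tsum, sumPos]
  | cons v rest ih =>
    have hT : Tsum (v :: rest) = v.toNat + Tsum rest := by simp [Tsum, sumPos_cons]
    have h0 := maxPos_nonneg rest
    simp only [maxPos]; split_ifs with hv <;> (rw [hT]; omega)

-- arithmetic step identity for the closed form
lemma F_step (T M v M' : Int) (hM : 0 < M) (hv : 0 ≤ v) (hTv : M + v ≤ T)
    (h3 : v ≤ M') (h4 : M' ≤ max M v) (h5 : M' = 0 → T - 1 = M - 1)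
    (h6 : M' + (M - 1) ≤ T - 1) :
    Fform T M v = 1 + Fform (T - 1) M' (M - 1) := by
  unfold Fform; split_ifs <;> omega

-- when no allowed positive milestone remains, the closed form is 0
lemma F_zero (l : List Int) (last : Int) (hInv : LoopInv l last)
    (hM : allowMax l 0 last = 0) :
    Fform (Tsum l) 0 (fv l last) = 0 := by
  have hall : ∀ j : Nat, j < l.length → (j : Int) ≠ last → l.getD j 0 ≤ 0 := by
    intro j hj hne
    by_contra hpos
    have := allowMax_ge0 l last j hj hne (by omega)
    omega
  rcases hInv.2 with h | ⟨k, hk1, hk2, hk3, hk4⟩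
  · have hfv : fv l last = 0 := by simp [fv, h]
    have hT : sumPos l = 0 := by
      refine sumPos_all_nonpos l ?_
      intro j hj
      exact hall j hj (by rw [h]; omega)
    rw [hfv]
    simp only [Tsum, hT]
    unfold Fform
    split_ifs <;> simp
  · have hfv : fv l last = l.getD k 0 := by
      rw [fv, if_pos (by omega)]
      congr 1
      omega
    have hT : sumPos l = (l.getD k 0).toNat := by
      refine sumPos_single l k hk2 ?_
      intro j hj hjk
      exact hall j hj (by omega)
    rw [hfv]
    simp only [Tsum, hT]
    unfold Fform
    split_ifs <;> omega

-- the while-loop returns weeks + Fform of the current state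
lemma fv_nonneg (l : List Int) (last : Int) (hInv : LoopInv l last) : 0 ≤ fv l last := by
  rcases hInv.2 with h | ⟨k, hk1, hk2, hk3, _⟩
  · simp [fv, h]
  · rw [fv, if_pos (by omega)]
    have : last.toNat = k := by omega
    rw [this]; exact hk3

lemma aLoop_closed (n : Nat) : ∀ (l : List Int) (last w : Int), sumPos l ≤ n → LoopInv l last →
    aLoop l w last = w + Fform (Tsum l) (allowMax l 0 last) (fv l last) := by
  induction n with
  | zero =>
    intro l last w hn hInv
    have hM : allowMax l 0 last = 0 := by
      by_contra hM0
      have hpos : 0 < allowMax l 0 last := by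
        have := allowMax_nonneg l 0 last; omega
      obtain ⟨k, hk, hne, hval⟩ := allowMax_attained l 0 last hpos
      have := getD_le_sumPos' l k hk
      omega
    have hscan : (aScan l 0 last 0 (-1)).1 = 0 := by
      rw [aScan_fst l 0 last 0 (-1) hInv.1 le_rfl, hM]; simp
    rw [aLoop, dif_pos hscan, hM, F_zero l last hInv hM]
    omega
  | succ n ih =>
    intro l last w hn hInv
    set M := allowMax l 0 last with hMdef
    have hscan : (aScan l 0 last 0 (-1)).1 = M := by
      have := aScan_fst l 0 last 0 (-1) hInv.1 le_rfl
      have h0 := allowMax_nonneg l 0 last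
      omega
    by_cases hM : M = 0
    · rw [aLoop, dif_pos (by omega), hM, F_zero l last hInv (by omega)]
      omega
    · have hMpos : 0 < M := by have := allowMax_nonneg l 0 last; omega
      obtain ⟨hpos, k, hk, hklen, hkne, hkval⟩ :=
        aScan_valid l l 0 last 0 (-1) (by simp) (by intro h; exact absurd rfl h) (by omega)
      rw [hscan] at hkval
      -- the update written in the port equals l.set k (M - 1)
      have h1 : PySem.List.pyGetD l (aScan l 0 last 0 (-1)).2 0 = l.getD k 0 := by
        rw [hk]; exact PySem.List.pyGetD_natCast ..
      have h2 : PySem.List.pySetD l (aScan l 0 last 0 (-1)).2 (PySem.List.pyGetD l (aScan l 0 last 0 (-1)).2 0 - 1)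
          = l.set k (M - 1) := by
        rw [h1, hk, hkval]; exact PySem.List.pySetD_natCast ..
      set l' := l.set k (M - 1) with hl'
      have hInv' : LoopInv l' (k : Int) := inv_step l last hInv k hklen hkne hkval hMpos
      have hsum : sumPos l' = sumPos l - 1 := by
        rw [hl']
        have := sumPos_set l k (M - 1) hklen
        have h4 := getD_le_sumPos' l k hklen
        rw [hkval] at this h4
        omega
      have hMsum : M.toNat ≤ sumPos l := by
        have := getD_le_sumPos' l k hklen
        omega
      have hrec : aLoop l w last = aLoop l' (w + 1) (k : Int) := by
        rw [aLoop, dif_neg (by omega), h2, hk]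
      rw [hrec, ih l' (k : Int) (w + 1) (by omega) hInv']
      -- identify the new state's quantities
      have hfv' : fv l' (k : Int) = M - 1 := by
        rw [fv, if_pos (by omega)]
        have ht : ((k : Int)).toNat = k := by omega
        rw [ht, getD_set_my, if_pos ⟨rfl, hklen⟩]
      have hT' : Tsum l' = Tsum l - 1 := by
        simp only [Tsum, hsum]
        have : 1 ≤ sumPos l := by omega
        omega
      set v := fv l last with hvdef
      have hv : 0 ≤ v := fv_nonneg l last hInv
      set M' := allowMax l' 0 (k : Int) with hM'def
      -- v lives at index last.toNat when positive
      have hTv : M + v ≤ Tsum l := by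
        by_cases hv0 : v = 0
        · rw [hv0]
          have := getD_le_sumPos' l k hklen
          simp only [Tsum]; omega
        · rcases hInv.2 with h | ⟨k2, hk21, hk22, hk23, _⟩
          · simp [fv, h] at hvdef; omega
          · have hfveq : v = l.getD k2 0 := by
              rw [hvdef, fv, if_pos (by omega)]
              congr 1
              omega
            have hkk2 : k ≠ k2 := by
              intro hcontra
              apply hkne
              rw [hcontra]; omega
            have := pair_le_sumPos l k k2 hkk2 hklen hk22
            rw [hkval, ← hfveq] at this
            simp only [Tsum]; omega
      have h3 : v ≤ M' := by
        by_cases hv0 : v ≤ 0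
        · have := allowMax_nonneg l' 0 (k : Int); omega
        · rcases hInv.2 with h | ⟨k2, hk21, hk22, hk23, _⟩
          · simp [fv, h] at hvdef; omega
          · have hfveq : v = l.getD k2 0 := by
              rw [hvdef, fv, if_pos (by omega)]
              congr 1
              omega
            have hkk2 : k ≠ k2 := by
              intro hcontra
              apply hkne
              rw [hcontra]; omega
            have hllen : l'.length = l.length := by rw [hl', List.length_set]
            have hgv : l'.getD k2 0 = l.getD k2 0 := by
              rw [hl', getD_set_my, if_neg (by tauto)]
            have := allowMax_ge0 l' (k : Int) k2 (by omega) (by omega) (by omega)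
            omega
      have h4 : M' ≤ max M v := by
        refine allowMax_le l' 0 (k : Int) (max M v) (by omega) ?_
        intro j hj hne
        rw [List.length_set] at hj
        have hjk : j ≠ k := by
          intro hcontra
          apply hne
          rw [hcontra]; omega
        have hgj : l'.getD j 0 = l.getD j 0 := by
          rw [hl', getD_set_my, if_neg (by tauto)]
        rw [hgj]
        by_cases hjl : (j : Int) = last
        · rcases hInv.2 with h | ⟨k2, hk21, hk22, hk23, _⟩
          · omega
          · have : j = k2 := by omega
            subst this
            have hfveq : v = l.getD j 0 := by
              rw [hvdef, fv, if_pos (by omega)]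
              congr 1
              omega
            omega
        · by_cases hjp : 0 < l.getD j 0
          · have := allowMax_ge0 l last j hj hjl hjp
            omega
          · omega
      have h5 : M' = 0 → Tsum l' - 1 + 1 = M - 1 := by
        intro hM'0
        have hall : ∀ j : Nat, j < l'.length → j ≠ k → l'.getD j 0 ≤ 0 := by
          intro j hj hjk
          by_contra hpos'
          have := allowMax_ge0 l' (k : Int) j hj (by omega) (by omega)
          omega
        have hs := sumPos_single l' k (by rw [hl', List.length_set]; omega) hall
        have hgk : l'.getD k 0 = M - 1 := by
          rw [hl', getD_set_my, if_pos ⟨rfl, hklen⟩]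
        rw [hgk] at hs
        simp only [Tsum, hs]
        omega
      have h6 : M' + (M - 1) ≤ Tsum l' := by
        by_cases hM'0 : M' = 0
        · have := h5 hM'0; omega
        · have hM'pos : 0 < M' := by
            have := allowMax_nonneg l' 0 (k : Int); omega
          obtain ⟨j, hj, hjne, hjval⟩ := allowMax_attained l' 0 (k : Int) hM'pos
          have hjk : j ≠ k := by
            intro hcontra
            apply hjne
            rw [hcontra]; simp
          have hgk : l'.getD k 0 = M - 1 := by
            rw [hl', getD_set_my, if_pos ⟨rfl, hklen⟩]
          have hklen' : k < l'.length := by rw [hl', List.length_set]; omega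
          have := pair_le_sumPos l' j k hjk hj hklen'
          rw [hjval, hgk] at this
          simp only [Tsum]
          omega
      have hF := F_step (Tsum l) M v M' hMpos hv hTv h3 h4 (by intro h; have := h5 h; omega) (by omega)
      rw [hfv', hT', hF]
      ring

-- ===== VERDICT (by name: the statement is the Claim_ definition above) =====
theorem numberOfWeeks_spec : Claim_equal_numberOfWeeks := by
  intro milestones _
  unfold Spec_numberOfWeeks numberOfWeeks numberOfWeeks_alt
  set s := PySem.List.sorted milestones (fun x => x) true with hs
  have hperm : s.Perm milestones := PySem.List.sorted_perm ..
  have hInv : LoopInv s (-1) := by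
    constructor
    · intro i j hij hj
      have hp := PySem.List.sorted_pairwise_rev (xs := milestones) (key := fun x => x)
      rw [← hs, List.pairwise_iff_getElem] at hp
      have hi : i < s.length := by omega
      have hij' := hp i j hi hj hij
      rw [List.getD_eq_getElem?_getD, List.getD_eq_getElem?_getD,
        List.getElem?_eq_getElem hi, List.getElem?_eq_getElem hj]
      simp only [Option.getD_some]
      have : s[j] ≤ s[i] := hij'
      omega
    · left; rfl
  rw [aLoop_closed (sumPos s) s (-1) 0 le_rfl hInv]
  have hfv : fv s (-1) = 0 := by simp [fv]
  have hM : allowMax s 0 (-1) = maxPos s := allowMax_neg_one s 0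
  rw [hfv, hM, maxPos_perm s milestones hperm, Tsum_perm s milestones hperm,
    bFold milestones 0 0 le_rfl]
  have h1 := maxPos_nonneg milestones
  have h2 := maxPos_le_Tsum milestones
  simp only [zero_add]
  have hmax : max (0 : Int) (maxPos milestones) = maxPos milestones := by omega
  rw [hmax]
  unfold Fform
  split_ifs <;> omega
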